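-- pv_equiv track=rewrite | github.com/sangwoong03/- | 프로그래머스/0/181926. 수 조작하기 1/수 조작하기 1.py | solution
-- ===== SOURCE A (Python) =====
-- def solution(n, control):
--     for command in control:
--         if command == 'w':
--             n += 1
--         elif command == 's':
--             n -= 1
--         elif command == 'd':
--             n += 10
--         elif command == 'a':
--             n -= 10
--
--     return n
-- ===== SOURCE B (Python) =====
-- def solution(n, control):
--     return (n + control.count('w') - control.count('s')
--               + 10 * control.count('d') - 10 * control.count('a'))
-- ===== Notes on version B (the rewrite author's own statement) =====
-- stated objective: simpler
-- what changed: Replaces the per-character branching loop with a closed arithmetic expression built from four str.count occurrence scans.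
import Mathlib
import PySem

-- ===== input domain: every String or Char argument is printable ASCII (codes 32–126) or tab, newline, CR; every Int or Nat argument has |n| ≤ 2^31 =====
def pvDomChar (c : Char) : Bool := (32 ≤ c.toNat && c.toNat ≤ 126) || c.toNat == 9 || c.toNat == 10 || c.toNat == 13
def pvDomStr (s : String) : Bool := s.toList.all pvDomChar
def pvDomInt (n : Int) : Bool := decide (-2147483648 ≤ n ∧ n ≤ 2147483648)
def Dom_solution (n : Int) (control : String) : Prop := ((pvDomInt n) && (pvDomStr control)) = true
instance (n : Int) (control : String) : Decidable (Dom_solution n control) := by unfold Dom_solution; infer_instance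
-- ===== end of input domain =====

-- B replaces A's per-character branching loop with a closed arithmetic formula over four str.count scans (objective: simpler).

-- ===== PORT A =====
-- for command in control: branch on the command, adjusting n
def solution (n : Int) (control : String) : Int :=
  control.toList.foldl
    (fun n command =>
      if command = 'w' then n + 1
      else if command = 's' then n - 1
      else if command = 'd' then n + 10
      else if command = 'a' then n - 10
      else n) n

-- ===== PORT B =====
-- closed formula from four substring counts (str.count = PySem.Str.count)
def solution_alt (n : Int) (control : String) : Int :=
  n + (PySem.Str.count control "w" : Int) - (PySem.Str.count control "s" : Int)
    + 10 * (PySem.Str.count control "d" : Int) - 10 * (PySem.Str.count control "a" : Int)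

-- ===== PRECONDITION & SPEC =====
def Spec_solution (n : Int) (control : String) (out : Int) : Prop := out = solution_alt n control
instance (n : Int) (control : String) (out : Int) : Decidable (Spec_solution n control out) := by unfold Spec_solution; infer_instance

-- ===== CLAIM (what is proved, stated in full; the proofs are below) =====
def Claim_equal_solution : Prop := ∀ (n : Int) (control : String), Dom_solution n control → Spec_solution n control (solution n control)

-- ===== LEMMAS AND PROOFS =====

-- Python s.count(c) for a single character c is the element count
theorem chars_count_go_singleton (c : Char) (l : List Char) (fuel acc : Nat)
    (h : l.length ≤ fuel) :
    PySem.Chars.count.go [c] fuel l acc = acc + l.count c := by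
  induction l generalizing fuel acc with
  | nil => cases fuel <;> simp [PySem.Chars.count.go]
  | cons hd tl ih =>
    cases fuel with
    | zero => simp at h
    | succ f =>
      simp only [List.length_cons, Nat.succ_le_succ_iff] at h
      by_cases hc : hd = c
      · subst hc
        simp [PySem.Chars.count.go, List.isPrefixOf, ih _ _ h]
        omega
      · have : List.isPrefixOf [c] (hd :: tl) = false := by
          simp [List.isPrefixOf]; exact fun e => (hc e.symm).elim
        simp [PySem.Chars.count.go, this, ih _ _ h, hc]

theorem chars_count_singleton (c : Char) (l : List Char) :
    PySem.Chars.count l [c] = l.count c := by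
  simp [PySem.Chars.count]
  simpa using chars_count_go_singleton c l l.length 0 le_rfl

theorem foldl_wasd (cs : List Char) (n : Int) :
    cs.foldl
      (fun n command =>
        if command = 'w' then n + 1
        else if command = 's' then n - 1
        else if command = 'd' then n + 10
        else if command = 'a' then n - 10
        else n) n
    = n + (cs.count 'w' : Int) - (cs.count 's' : Int)
        + 10 * (cs.count 'd' : Int) - 10 * (cs.count 'a' : Int) := by
  induction cs generalizing n with
  | nil => simp
  | cons hd tl ih =>
    simp only [List.foldl_cons, ih, List.count_cons]
    by_cases h1 : hd = 'w' <;> by_cases h2 : hd = 's' <;> by_cases h3 : hd = 'd' <;>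
      by_cases h4 : hd = 'a' <;>
      simp_all <;> ring

-- ===== VERDICT (by name: the statement is the Claim_ definition above) =====
theorem solution_spec : Claim_equal_solution := by
  intro n control _
  unfold Spec_solution solution solution_alt
  have hw := chars_count_singleton 'w' control.toList
  have hs := chars_count_singleton 's' control.toList
  have hd := chars_count_singleton 'd' control.toList
  have ha := chars_count_singleton 'a' control.toList
  simp only [PySem.Str.count_eq] at *
  rw [foldl_wasd]
  simp_all
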